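-- pv_equiv track=rewrite | github.com/Ry4nW/python-wars | binarysearch/minimumString.py | solve
-- ===== SOURCE A (Python) =====
-- from collections import Counter
--
-- def solve(s, t):
--     hashTable = Counter(s)
--     changeCount = 0
--
--     for i in t:
--         try:
--             if hashTable[i] > 0:
--                 hashTable[i] -= 1
--                 continue
--             changeCount += 1
--         except:
--             changeCount += 1
--
--     return changeCount
-- ===== SOURCE B (Python) =====
-- def solve(s, t):
--     ss = sorted(s)
--     tt = sorted(t)
--     i = j = matched = 0
--     while i < len(ss) and j < len(tt):
--         if ss[i] == tt[j]:
--             matched += 1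
--             i += 1
--             j += 1
--         elif ss[i] < tt[j]:
--             i += 1
--         else:
--             j += 1
--     return len(tt) - matched
-- ===== Notes on version B (the rewrite author's own statement) =====
-- stated objective: alternative
-- what changed: Replaces A's Counter frequency table and streaming per-character decrement by sorting both strings and running a two-pointer merge that counts matched characters; the answer is len(t) minus the matched count (the size of the multiset intersection).
import Mathlib
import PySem

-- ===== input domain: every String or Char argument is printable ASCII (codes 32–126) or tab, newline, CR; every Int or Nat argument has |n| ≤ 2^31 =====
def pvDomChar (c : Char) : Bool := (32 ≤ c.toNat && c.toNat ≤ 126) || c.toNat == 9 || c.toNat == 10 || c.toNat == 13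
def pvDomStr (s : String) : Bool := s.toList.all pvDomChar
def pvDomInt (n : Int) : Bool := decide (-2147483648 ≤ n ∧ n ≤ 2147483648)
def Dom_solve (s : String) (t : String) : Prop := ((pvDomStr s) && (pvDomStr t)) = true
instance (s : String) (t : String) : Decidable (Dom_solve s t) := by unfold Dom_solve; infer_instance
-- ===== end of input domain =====

-- B replaces A's Counter table with a streaming decrement by a sort-then-two-pointer merge:
-- sort both strings, count matched characters by merging, return len(t) - matched.
-- Objective: alternative algorithm; same result on all inputs.


-- ===== PORT A =====
-- hashTable = Counter(s); for i in t: if hashTable[i] > 0: hashTable[i] -= 1 else changeCount += 1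
-- (the except branch is dead: Counter indexing never raises)
def solve (s : String) (t : String) : Int :=
  let hashTable := PySem.Dict.counter s.toList
  (t.toList.foldl
    (fun (st : PySem.Dict Char Int × Int) i =>
      if st.1.getD i 0 > 0 then (st.1.modify i 0 (· - 1), st.2)
      else (st.1, st.2 + 1))
    (hashTable, 0)).2

-- ===== PORT B =====
-- the while loop over the two sorted lists with indices i, j: each step consumes the head of
-- one or both lists, so it is the structural recursion on the two suffixes
def pvMatched : List Char → List Char → Nat
  | [], _ => 0
  | _ :: _, [] => 0
  | x :: xs, y :: ys =>
      if x = y then pvMatched xs ys + 1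
      else if x < y then pvMatched xs (y :: ys)
      else pvMatched (x :: xs) ys
  termination_by a b => a.length + b.length

def solve_alt (s : String) (t : String) : Int :=
  let ss := PySem.List.sorted s.toList (fun c => c) false
  let tt := PySem.List.sorted t.toList (fun c => c) false
  (tt.length : Int) - (pvMatched ss tt : Int)

-- ===== PRECONDITION & SPEC =====
def Spec_solve (s : String) (t : String) (out : Int) : Prop := out = solve_alt s t
instance (s : String) (t : String) (out : Int) : Decidable (Spec_solve s t out) := by unfold Spec_solve; infer_instance

-- ===== CLAIM (what is proved, stated in full; the proofs are below) =====
def Claim_equal_solve : Prop := ∀ (s : String) (t : String), Dom_solve s t → Spec_solve s t (solve s t)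

-- ===== LEMMAS AND PROOFS =====

-- A's loop, abstracted over the dict state: result is acc plus, per distinct char of ts,
-- the number of its occurrences not covered by the remaining budget h.getD c 0.
theorem pv_loop_eq (ts : List Char) : ∀ (h : PySem.Dict Char Int) (acc : Int),
    (∀ c, 0 ≤ h.getD c 0) →
    (ts.foldl
      (fun (st : PySem.Dict Char Int × Int) i =>
        if st.1.getD i 0 > 0 then (st.1.modify i 0 (· - 1), st.2)
        else (st.1, st.2 + 1))
      (h, acc)).2
    = acc + ∑ c ∈ ts.toFinset, max 0 ((ts.count c : Int) - h.getD c 0) := by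
  induction ts with
  | nil => intro h acc _; simp
  | cons i rest ih =>
    intro h acc hnn
    rw [List.foldl_cons]
    by_cases hpos : h.getD i 0 > 0
    · simp only [hpos, if_pos]
      rw [ih (h.modify i 0 (· - 1)) acc (by
        intro c
        rw [PySem.Dict.getD_modify]
        split_ifs with hc
        · subst hc; omega
        · exact hnn c)]
      congr 1
      by_cases hmem : i ∈ rest
      · rw [List.toFinset_cons, Finset.insert_eq_self.mpr (List.mem_toFinset.mpr hmem)]
        apply Finset.sum_congr rfl
        intro c _
        rw [PySem.Dict.getD_modify]
        by_cases hc : c = i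
        · subst hc; simp [List.count_cons_self]; omega
        · simp [Ne.symm hc, hc]
      · rw [List.toFinset_cons,
          Finset.sum_insert (by simp [List.mem_toFinset, hmem])]
        have hcnt : rest.count i = 0 := List.count_eq_zero.mpr hmem
        have h1 : max 0 (((i :: rest).count i : Int) - h.getD i 0) = 0 := by
          rw [List.count_cons_self, hcnt]; omega
        rw [h1, zero_add]
        apply Finset.sum_congr rfl
        intro c hc
        have hci : c ≠ i := by
          rintro rfl; exact hmem (List.mem_toFinset.mp hc)
        rw [PySem.Dict.getD_modify]
        simp [Ne.symm hci, hci]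
    · simp only [hpos, if_neg, not_false_iff]
      rw [ih h (acc + 1) hnn]
      have hz : h.getD i 0 = 0 := le_antisymm (by omega) (hnn i)
      by_cases hmem : i ∈ rest
      · rw [List.toFinset_cons, Finset.insert_eq_self.mpr (List.mem_toFinset.mpr hmem)]
        have : ∀ c ∈ rest.toFinset,
            max 0 (((i :: rest).count c : Int) - h.getD c 0)
            = max 0 ((rest.count c : Int) - h.getD c 0) + (if c = i then 1 else 0) := by
          intro c _
          by_cases hc : c = i
          · subst hc; rw [List.count_cons_self, hz]; simp; omega
          · simp [Ne.symm hc, hc]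
        rw [Finset.sum_congr rfl this, Finset.sum_add_distrib,
          Finset.sum_ite_eq' rest.toFinset i (fun _ => (1 : Int))]
        simp [List.mem_toFinset.mpr hmem]
        ring
      · rw [List.toFinset_cons,
          Finset.sum_insert (by simp [List.mem_toFinset, hmem])]
        have hcnt : rest.count i = 0 := List.count_eq_zero.mpr hmem
        have h1 : max 0 (((i :: rest).count i : Int) - h.getD i 0) = 1 := by
          rw [List.count_cons_self, hcnt, hz]; omega
        rw [h1]
        have : ∑ c ∈ rest.toFinset, max 0 (((i :: rest).count c : Int) - h.getD c 0)
            = ∑ c ∈ rest.toFinset, max 0 ((rest.count c : Int) - h.getD c 0) := by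
          apply Finset.sum_congr rfl
          intro c hc
          have hci : c ≠ i := by rintro rfl; exact hmem (List.mem_toFinset.mp hc)
          simp [Ne.symm hci]
        rw [this]; ring

-- The two-pointer merge on two ≤-sorted lists counts the multiset intersection.
theorem pv_matched_eq_card_inter : ∀ (a b : List Char),
    a.Pairwise (· ≤ ·) → b.Pairwise (· ≤ ·) →
    pvMatched a b = ((a : Multiset Char) ∩ (b : Multiset Char)).card := by
  intro a
  induction a with
  | nil => intro b _ _; simp [pvMatched]
  | cons x xs iha =>
    intro b
    induction b with
    | nil => intro _ _; simp [pvMatched]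
    | cons y ys ihb =>
      intro ha hb
      have haxs := ha.of_cons
      have hbys := hb.of_cons
      by_cases hxy : x = y
      · subst hxy
        rw [pvMatched, if_pos rfl, iha ys haxs hbys]
        have heq : ((x :: xs : List Char) : Multiset Char) ∩ ((x :: ys : List Char) : Multiset Char)
            = x ::ₘ (((xs : List Char) : Multiset Char) ∩ ((ys : List Char) : Multiset Char)) := by
          ext c
          rcases eq_or_ne c x with rfl | hc
          · simp only [Multiset.count_inter, Multiset.coe_count, List.count_cons_self,
              Multiset.count_cons_self]
            omega
          · simp [Multiset.count_inter, Multiset.count_cons_of_ne hc, List.count_cons_of_ne hc]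
        rw [heq, Multiset.card_cons]
      · by_cases hlt : x < y
        · rw [pvMatched, if_neg hxy, if_pos hlt, iha (y :: ys) haxs hb]
          congr 1
          have hxnb : (y :: ys).count x = 0 := by
            rw [List.count_eq_zero]
            intro hmem
            rw [List.mem_cons] at hmem
            rcases hmem with rfl | hmem
            · exact lt_irrefl _ hlt
            · exact absurd (List.rel_of_pairwise_cons hb hmem) (not_le.mpr hlt)
          ext c
          rcases eq_or_ne c x with rfl | hc
          · simp [Multiset.count_inter, hxnb]
          · simp [List.count_cons, hc, Ne.symm hc]
        · have hyx : y < x := lt_of_le_of_ne (not_lt.mp hlt) (Ne.symm hxy)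
          rw [pvMatched, if_neg hxy, if_neg hlt, ihb ha hbys]
          congr 1
          have hyna : (x :: xs).count y = 0 := by
            rw [List.count_eq_zero]
            intro hmem
            rw [List.mem_cons] at hmem
            rcases hmem with rfl | hmem
            · exact lt_irrefl _ hyx
            · exact absurd (List.rel_of_pairwise_cons ha hmem) (not_le.mpr hyx)
          ext c
          rcases eq_or_ne c y with rfl | hc
          · simp [Multiset.count_inter, hyna]
          · simp [List.count_cons, hc, Ne.symm hc]

-- B as a Finset sum over the distinct characters of t.
theorem pv_alt_eq (s t : String) :
    solve_alt s t
    = ∑ c ∈ t.toList.toFinset,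
        max 0 ((t.toList.count c : Int) - (s.toList.count c : Int)) := by
  have hps := PySem.List.sorted_perm s.toList (fun c => c) false
  have hpt := PySem.List.sorted_perm t.toList (fun c => c) false
  simp only [solve_alt]
  rw [pv_matched_eq_card_inter _ _
        (by simpa using PySem.List.sorted_pairwise s.toList (fun c => c))
        (by simpa using PySem.List.sorted_pairwise t.toList (fun c => c)),
      hpt.length_eq]
  have hinter :
      (((PySem.List.sorted s.toList (fun c => c) false : List Char) : Multiset Char)
        ∩ ((PySem.List.sorted t.toList (fun c => c) false : List Char) : Multiset Char))
      = ((s.toList : Multiset Char) ∩ (t.toList : Multiset Char)) := by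
    rw [Multiset.coe_eq_coe.mpr hps, Multiset.coe_eq_coe.mpr hpt]
  rw [hinter]
  -- card of the intersection as a sum of mins over t's distinct chars
  have hcount : ∀ c, Multiset.count c ((s.toList : Multiset Char) ∩ (t.toList : Multiset Char))
      = min (s.toList.count c) (t.toList.count c) := by
    intro c; simp [Multiset.count_inter]
  have hsub : ((s.toList : Multiset Char) ∩ (t.toList : Multiset Char)).toFinset
      ⊆ t.toList.toFinset := by
    intro c hc
    have h1 := Multiset.mem_toFinset.mp hc
    rw [Multiset.mem_inter] at h1
    exact List.mem_toFinset.mpr (by simpa using h1.2)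
  have hcard : ((s.toList : Multiset Char) ∩ (t.toList : Multiset Char)).card
      = ∑ c ∈ t.toList.toFinset, min (s.toList.count c) (t.toList.count c) :=
    calc ((s.toList : Multiset Char) ∩ (t.toList : Multiset Char)).card
        = ∑ c ∈ ((s.toList : Multiset Char) ∩ (t.toList : Multiset Char)).toFinset,
            Multiset.count c ((s.toList : Multiset Char) ∩ (t.toList : Multiset Char)) :=
          (Multiset.toFinset_sum_count_eq _).symm
      _ = ∑ c ∈ ((s.toList : Multiset Char) ∩ (t.toList : Multiset Char)).toFinset,
            min (s.toList.count c) (t.toList.count c) :=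
          Finset.sum_congr rfl (fun c _ => hcount c)
      _ = ∑ c ∈ t.toList.toFinset, min (s.toList.count c) (t.toList.count c) :=
          Finset.sum_subset hsub (fun c _ hc => by
            rw [← hcount c]
            exact Multiset.count_eq_zero.mpr (fun h => hc (Multiset.mem_toFinset.mpr h)))
  rw [hcard]
  have hlen : ((t.toList.length : Int))
      = ∑ c ∈ t.toList.toFinset, (t.toList.count c : Int) := by
    have := Multiset.toFinset_sum_count_eq (t.toList : Multiset Char)
    have h2 : ∑ c ∈ t.toList.toFinset, t.toList.count c = t.toList.length := by
      simpa using this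
    rw [← h2]
    push_cast
    rfl
  rw [hlen]
  push_cast
  rw [← Finset.sum_sub_distrib]
  apply Finset.sum_congr rfl
  intro c _
  omega

-- ===== VERDICT (by name: the statement is the Claim_ definition above) =====
theorem solve_spec : Claim_equal_solve := by
  intro s t _
  unfold Spec_solve solve
  rw [pv_loop_eq t.toList (PySem.Dict.counter s.toList) 0
    (by intro c; rw [PySem.Dict.getD_counter]; exact Int.natCast_nonneg _)]
  rw [pv_alt_eq, zero_add]
  apply Finset.sum_congr rfl
  intro c _
  rw [PySem.Dict.getD_counter]
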